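-- pv_equiv track=rewrite | github.com/eliottcassidy2000/math | 04-computation/a051240_closedform_derive.py | N4_pair
-- ===== SOURCE A (Python) =====
-- from math import gcd, factorial
--
-- def lcm(a, b):
--     return a * b // gcd(a, b)
--
-- def binomial(n, k):
--     if k < 0 or k > n:
--         return 0
--     if k == 0 or k == n:
--         return 1
--     k = min(k, n - k)
--     result = 1
--     for i in range(k):
--         result = result * (n - i) // (i + 1)
--     return result
--
-- def N4_pair(r, s):
--     """Number of orbits on 4-subsets spanning two cycle types r and s.
--
--     Elements from a cycle of length r and a cycle of length s.
--     The joint action is Z_{lcm(r,s)} acting on pairs of subsets.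
--
--     Actually, for two cycles of lengths r and s, the permutation sigma acts
--     as a product of two independent cyclic permutations. sigma^t acts on the
--     r-cycle with gcd(t,r) orbits and on the s-cycle with gcd(t,s) orbits.
--
--     We need 4-subsets that use elements from both cycles.
--     Specifically, pick j elements from the r-cycle and 4-j from the s-cycle (j=1,2,3).
--
--     For a fixed t, f(t) = sum_{j=1}^{3} [x^j](1+x^{r/g_r})^{g_r} * [x^{4-j}](1+x^{s/g_s})^{g_s}
--     where g_r = gcd(t,r), g_s = gcd(t,s).
--
--     Total orbits = (1/lcm(r,s)) * sum_{t=0}^{lcm(r,s)-1} f(t)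
--     """
--     L = lcm(r, s)
--     total = 0
--     for t in range(L):
--         gr = gcd(t, r) if t > 0 else r
--         gs = gcd(t, s) if t > 0 else s
--         lr = r // gr
--         ls = s // gs
--
--         # Compute [x^j](1+x^lr)^gr for j=0..4
--         poly_r = [0] * 5
--         for j in range(gr + 1):
--             deg = j * lr
--             if deg > 4:
--                 break
--             poly_r[deg] = binomial(gr, j)
--
--         poly_s = [0] * 5
--         for j in range(gs + 1):
--             deg = j * ls
--             if deg > 4:
--                 break
--             poly_s[deg] = binomial(gs, j)
--
--         # Cross terms: j from r, 4-j from s, with j >= 1 and 4-j >= 1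
--         for j in range(1, 4):
--             total += poly_r[j] * poly_s[4 - j]
--
--     assert total % L == 0, f"N4_pair({r},{s}) not integer: {total}/{L}"
--     return total // L
-- ===== SOURCE B (Python) =====
-- from math import gcd, comb, isqrt
--
--
-- def N4_pair(r, s):
--     """Number of orbits on 4-subsets spanning two cycle types r and s.
--
--     Burnside sum grouped by divisor classes: the summand for t depends only
--     on d = gcd(t, L), and exactly phi(L/d) values of t in [0, L) share each
--     divisor d of L.  phi is computed on the divisors of L by the recursion
--     phi(m) = m - sum of phi over proper divisors of m.
--     """
--     L = r * s // gcd(r, s)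
--
--     def coeff(n, g, j):
--         # [x^j](1 + x^(n//g))^g  for 0 <= j <= 4
--         l = n // g
--         return comb(g, j // l) if j % l == 0 else 0
--
--     def f(d):
--         gr, gs = gcd(d, r), gcd(d, s)
--         return sum(coeff(r, gr, j) * coeff(s, gs, 4 - j) for j in range(1, 4))
--
--     # divisors of L, ascending
--     divs = []
--     for i in range(1, isqrt(L) + 1 if L > 0 else 1):
--         if L % i == 0:
--             divs.append(i)
--             if i != L // i:
--                 divs.append(L // i)
--     divs.sort()
--
--     # phi on the divisors of L via  phi(m) = m - sum_{d|m, d<m} phi(d)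
--     phi = {}
--     for m in divs:
--         phi[m] = m - sum(phi[d] for d in divs if d < m and m % d == 0)
--
--     total = sum(phi[L // d] * f(d) for d in divs)
--     return total // L
-- ===== Notes on version B (the rewrite author's own statement) =====
-- stated objective: faster
-- what changed: Instead of evaluating the Burnside summand for every t in range(lcm(r,s)), B enumerates the divisors d of L=lcm(r,s) by trial division up to sqrt(L), computes Euler phi on those divisors by the recursion phi(m)=m-sum of phi over proper divisors, and sums phi(L/d)*f(d); the per-class value f uses math.comb instead of a hand-rolled binomial loop.
-- outside the precondition, e.g. on N4_pair(-2, -3): A returns 0, B raises ValueError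
import Mathlib
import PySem

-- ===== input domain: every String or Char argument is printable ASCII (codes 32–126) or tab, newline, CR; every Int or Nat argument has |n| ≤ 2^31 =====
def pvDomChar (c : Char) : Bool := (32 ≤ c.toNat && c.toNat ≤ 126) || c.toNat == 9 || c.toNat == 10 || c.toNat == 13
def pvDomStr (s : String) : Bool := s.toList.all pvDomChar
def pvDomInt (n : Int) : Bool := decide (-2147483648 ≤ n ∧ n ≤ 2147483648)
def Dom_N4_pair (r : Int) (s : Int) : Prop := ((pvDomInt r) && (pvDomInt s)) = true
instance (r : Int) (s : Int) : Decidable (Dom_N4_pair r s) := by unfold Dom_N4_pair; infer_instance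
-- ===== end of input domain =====

-- B replaces A's O(lcm(r,s))-term Burnside sum by a sum over the divisors of L = lcm(r,s)
-- (enumerated by trial division up to sqrt(L)), weighting each class d by Euler's phi(L/d)
-- computed through the recursion phi(m) = m - sum of phi over proper divisors; objective: faster.

-- ===== PORT A =====

-- helper binomial(n, k) of A, with its floor-division product loop
def binomialA (n k : Int) : Int :=
  if k < 0 ∨ n < k then 0
  else if k = 0 ∨ k = n then 1
  else
    let k2 := min k (n - k)
    (PySem.List.pyRange 0 k2 1).foldl
      (fun result i => PySem.Int.floordiv (result * (n - i)) (i + 1)) 1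

-- A's "for j in range(g+1): deg = j*l; if deg > 4: break; poly[deg] = binomial(g, j)" loop.
-- pySetD is exact here: under Pre_ the write index j*l lies in [0,4] whenever the body runs.
def polyLoopA (g l : Int) (j : Int) (acc : List Int) : List Int :=
  if g + 1 ≤ j then acc
  else if 4 < j * l then acc
  else polyLoopA g l (j + 1) (PySem.List.pySetD acc (j * l) (binomialA g j))
termination_by (g + 1 - j).toNat
decreasing_by omega

-- A's assert on divisibility never fires on inputs admitted by Pre_ (Burnside divisibility
-- for positive r, s; total = 0 for mixed signs), so it is omitted from the port.
def N4_pair (r : Int) (s : Int) : Int :=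
  let L := PySem.Int.floordiv (r * s) (Int.gcd r s)
  let total := (PySem.List.pyRange 0 L 1).foldl (fun total t =>
    let gr : Int := if 0 < t then (Int.gcd t r : Int) else r
    let gs : Int := if 0 < t then (Int.gcd t s : Int) else s
    let lr := PySem.Int.floordiv r gr
    let ls := PySem.Int.floordiv s gs
    let pr := polyLoopA gr lr 0 [0, 0, 0, 0, 0]
    let ps := polyLoopA gs ls 0 [0, 0, 0, 0, 0]
    (PySem.List.pyRange 1 4 1).foldl (fun tot j =>
      tot + PySem.List.pyGetD pr j 0 * PySem.List.pyGetD ps (4 - j) 0) total) 0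
  PySem.Int.floordiv total L

-- ===== PORT B =====

-- math.comb(g, q): exact for 0 ≤ g, 0 ≤ q (every call B makes under Pre_)
def combB (n k : Int) : Int := (Nat.choose n.toNat k.toNat : Int)

-- B's coeff(n, g, j) = [x^j](1+x^(n//g))^g
def coeffB (n g j : Int) : Int :=
  let l := PySem.Int.floordiv n g
  if PySem.Int.mod j l = 0 then combB g (PySem.Int.floordiv j l) else 0

-- B's f(d)
def fB (r s d : Int) : Int :=
  let gr : Int := Int.gcd d r
  let gs : Int := Int.gcd d s
  ((PySem.List.pyRange 1 4 1).map (fun j => coeffB r gr j * coeffB s gs (4 - j))).sum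

def N4_pair_alt (r : Int) (s : Int) : Int :=
  let L := PySem.Int.floordiv (r * s) (Int.gcd r s)
  -- range(1, isqrt(L)+1 if L > 0 else 1)
  let bound : Int := if 0 < L then (Nat.sqrt L.toNat : Int) + 1 else 1
  let divs := (PySem.List.pyRange 1 bound 1).foldl (fun divs i =>
    if PySem.Int.mod L i = 0 then
      let divs := divs ++ [i]
      if i = PySem.Int.floordiv L i then divs else divs ++ [PySem.Int.floordiv L i]
    else divs) []
  let sdivs := PySem.List.sorted divs (fun x => x) false
  -- phi[m] = m - sum(phi[d] for d in divs if d < m and m % d == 0); the lookup phi[d]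
  -- is ported as getD _ 0, exact because every queried key d < m was inserted earlier.
  let phi := sdivs.foldl (fun phi m =>
    phi.insert m (m - ((sdivs.filter (fun d => decide (d < m ∧ PySem.Int.mod m d = 0))).map
      (fun d => phi.getD d 0)).sum)) PySem.Dict.empty
  let total := (sdivs.map (fun d => phi.getD (PySem.Int.floordiv L d) 0 * fB r s d)).sum
  PySem.Int.floordiv total L

-- ===== PRECONDITION & SPEC =====

-- Pre_ excludes r = 0 or s = 0 (A raises ZeroDivisionError) and the inputs with both r < 0
-- and s < 0, where A's poly lists are filled through accidental negative-index wraparound and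
-- A raises IndexError or returns an accidental value while B's comb raises ValueError.
def Pre_N4_pair (r : Int) (s : Int) : Prop := r ≠ 0 ∧ s ≠ 0 ∧ (0 < r ∨ 0 < s)
instance (r : Int) (s : Int) : Decidable (Pre_N4_pair r s) := by unfold Pre_N4_pair; infer_instance

def pvWitness_N4_pair : Int × Int := (4, 6)

def Spec_N4_pair (r : Int) (s : Int) (out : Int) : Prop := out = N4_pair_alt r s
instance (r : Int) (s : Int) (out : Int) : Decidable (Spec_N4_pair r s out) := by unfold Spec_N4_pair; infer_instance

-- ===== CLAIM (what is proved, stated in full; the proofs are below) =====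
def Claim_equal_N4_pair : Prop := ∀ (r : Int) (s : Int), Dom_N4_pair r s → Pre_N4_pair r s → Spec_N4_pair r s (N4_pair r s)

-- ===== LEMMAS AND PROOFS =====

theorem binom_fold (n : Nat) (m : Nat) (hm : m ≤ n) :
    (PySem.List.pyRange 0 (m:Int) 1).foldl
      (fun result i => PySem.Int.floordiv (result * ((n:Int) - i)) (i + 1)) 1
    = (n.choose m : Int) := by
  induction m with
  | zero => simp [PySem.List.pyRange_one_eq_nil]
  | succ m ih =>
    have h1 : ((m:Int) + 1) = ((m+1 : Nat) : Int) := by push_cast; ring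
    rw [show ((m+1 : Nat) : Int) = (m:Int) + 1 by push_cast; ring,
        PySem.List.pyRange_one_succ_right (by positivity), List.foldl_append,
        ih (by omega)]
    simp only [List.foldl]
    have key : (n.choose (m+1) : Int) * ((m:Int) + 1) = (n.choose m : Int) * ((n:Int) - (m:Int)) := by
      have := Nat.choose_succ_right_eq n m
      have hsub : ((n - m : Nat) : Int) = (n:Int) - (m:Int) := by
        have : m ≤ n := by omega
        push_cast [this]; ring
      calc (n.choose (m+1) : Int) * ((m:Int) + 1)
          = ((n.choose (m+1) * (m+1) : Nat) : Int) := by push_cast; ring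
        _ = ((n.choose m * (n - m) : Nat) : Int) := by rw [this]
        _ = (n.choose m : Int) * ((n:Int) - (m:Int)) := by push_cast [show m ≤ n by omega]; ring
    rw [PySem.Int.floordiv_eq_ediv_of_pos (by positivity), ← key,
        Int.mul_ediv_cancel _ (by positivity)]


theorem binomialA_eq (n k : Nat) : binomialA (n:Int) (k:Int) = (n.choose k : Int) := by
  unfold binomialA
  split_ifs with h1 h2
  · rcases h1 with h | h
    · omega
    · simp [Nat.choose_eq_zero_of_lt (by exact_mod_cast h)]
  · rcases h2 with h | h
    · have : k = 0 := by exact_mod_cast h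
      simp [this]
    · have : k = n := by exact_mod_cast h
      simp [this]
  · have hkn : k ≤ n := by
      rcases (not_or.mp h1) with ⟨_, h⟩
      exact_mod_cast not_lt.mp h
    have hmin : min (k:Int) ((n:Int) - (k:Int)) = ((min k (n-k) : Nat) : Int) := by
      push_cast [hkn]; omega
    show (PySem.List.pyRange 0 (min (k:Int) ((n:Int)-(k:Int))) 1).foldl _ 1 = _
    rw [hmin, binom_fold n (min k (n-k)) (by omega)]
    rcases Nat.le_total k (n - k) with h | h
    · rw [min_eq_left h]
    · rw [min_eq_right h, show n - k = n - k from rfl, Nat.choose_symm hkn]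

theorem polyLoop_invar (g l : Int) (hl : 1 ≤ l) :
    ∀ (fuel : Nat) (j : Int) (acc : List Int), 0 ≤ j → acc.length = 5 → (g + 1 - j).toNat ≤ fuel →
    ∀ (m : Nat), m < 5 →
    (polyLoopA g l j acc).getD m 0 =
      if j * l ≤ (m:Int) ∧ l ∣ (m:Int) ∧ (m:Int) / l ≤ g then binomialA g ((m:Int) / l)
      else acc.getD m 0 := by
  intro fuel
  induction fuel with
  | zero =>
    intro j acc hj hlen hfuel m hm
    rw [polyLoopA]
    rw [if_pos (by omega)]
    rw [if_neg]
    rintro ⟨hjl, ⟨q, hq⟩, hqg⟩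
    rw [hq, Int.mul_ediv_cancel_left _ (by omega)] at hqg
    have : j ≤ q := by nlinarith [hq ▸ hjl]
    omega
  | succ fuel ih =>
    intro j acc hj hlen hfuel m hm
    rw [polyLoopA]
    by_cases h1 : g + 1 ≤ j
    · rw [if_pos h1, if_neg]
      rintro ⟨hjl, ⟨q, hq⟩, hqg⟩
      rw [hq, Int.mul_ediv_cancel_left _ (by omega)] at hqg
      have : j ≤ q := by nlinarith [hq ▸ hjl]
      omega
    · rw [if_neg h1]
      by_cases h2 : 4 < j * l
      · rw [if_pos h2, if_neg]
        rintro ⟨hjl, -, -⟩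
        omega
      · rw [if_neg h2]
        have hjl0 : 0 ≤ j * l := by positivity
        rw [PySem.List.pySetD_of_nonneg _ _ hjl0]
        rw [ih (j+1) _ (by omega) (by rw [List.length_set]; omega) (by omega) m hm]
        by_cases hcase : (j*l).toNat = m
        · -- the entry written this step
          have hm' : (m : Int) = j * l := by omega
          have hq : (m:Int) / l = j := by rw [hm', Int.mul_ediv_cancel _ (by omega)]
          have hfalse : ¬((j+1) * l ≤ (m:Int) ∧ l ∣ (m:Int) ∧ (m:Int) / l ≤ g) := by
            rintro ⟨hjl2, -, -⟩
            nlinarith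
          have htrue : j * l ≤ (m:Int) ∧ l ∣ (m:Int) ∧ (m:Int) / l ≤ g :=
            ⟨le_of_eq hm'.symm, ⟨j, by rw [hm', mul_comm]⟩, by rw [hq]; omega⟩
          rw [if_neg hfalse, if_pos htrue, hq,
              List.getD_eq_getElem?_getD, hcase, List.getElem?_set_self (by omega),
              Option.getD_some]
        · -- untouched entry
          rw [List.getD_eq_getElem?_getD, List.getElem?_set_ne hcase, ← List.getD_eq_getElem?_getD]
          have hiff : ((j+1) * l ≤ (m:Int) ∧ l ∣ (m:Int) ∧ (m:Int) / l ≤ g)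
              ↔ (j * l ≤ (m:Int) ∧ l ∣ (m:Int) ∧ (m:Int) / l ≤ g) := by
            constructor
            · rintro ⟨hle, hdvd, hg2⟩
              exact ⟨by nlinarith, hdvd, hg2⟩
            · rintro ⟨hle, hdvd, hg2⟩
              refine ⟨?_, hdvd, hg2⟩
              rcases hdvd with ⟨q, hq⟩
              have hjq : j ≤ q := by nlinarith [hq ▸ hle]
              have hne : j * l ≠ (m:Int) := by omega
              have hlt : j < q := by
                rcases lt_or_eq_of_le hjq with h | h
                · exact h
                · exfalso; apply hne; rw [hq, ← h, mul_comm]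
              calc (j+1) * l ≤ q * l := by nlinarith
                _ = (m:Int) := by rw [hq, mul_comm]
          exact if_congr hiff rfl rfl

theorem polyLoop_getD (g l : Int) (hg : 1 ≤ g) (hl : 1 ≤ l) (m : Nat) (hm : m < 5) :
    (polyLoopA g l 0 [0,0,0,0,0]).getD m 0
      = if PySem.Int.mod (m:Int) l = 0 then combB g (PySem.Int.floordiv (m:Int) l) else 0 := by
  rw [polyLoop_invar g l hl (g+1).toNat 0 _ le_rfl rfl (by omega) m hm]
  rw [PySem.Int.floordiv_eq_ediv_of_pos (by omega)]
  by_cases hdvd : l ∣ (m:Int)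
  · rw [if_pos ((PySem.Int.mod_eq_zero_iff_dvd _ _).mpr hdvd)]
    have hq0 : 0 ≤ (m:Int) / l := Int.ediv_nonneg (by positivity) (by omega)
    by_cases hqg : (m:Int) / l ≤ g
    · rw [if_pos ⟨by simp, hdvd, hqg⟩]
      have e1 : (g:Int) = (g.toNat : Int) := by omega
      have e2 : ((m:Int)/l) = (((m:Int)/l).toNat : Int) := by omega
      rw [e1, e2, binomialA_eq]
      simp only [combB, Int.toNat_natCast]
    · rw [if_neg (by rintro ⟨-, -, h⟩; omega)]
      simp only [combB]
      rw [Nat.choose_eq_zero_of_lt (by omega)]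
      interval_cases m <;> rfl
  · rw [if_neg (fun h => hdvd ((PySem.Int.mod_eq_zero_iff_dvd _ _).mp h)),
        if_neg (by rintro ⟨-, h, -⟩; exact hdvd h)]
    interval_cases m <;> rfl

-- the gcd, as A computes it, for 0 ≤ t and 0 < r
theorem grA_eq (t r : Int) (ht : 0 ≤ t) (hr : 0 < r) :
    (if 0 < t then ((Int.gcd t r : Nat) : Int) else r) = ((Int.gcd t r : Nat) : Int) := by
  split_ifs with h
  · rfl
  · have ht0 : t = 0 := by omega
    subst ht0
    simp [Int.gcd]
    exact (abs_of_pos hr).symm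

theorem gcd_pos_dvd (t r : Int) (hr : 0 < r) :
    (1:Int) ≤ ((Int.gcd t r : Nat) : Int) ∧ ((Int.gcd t r : Nat) : Int) ∣ r := by
  constructor
  · have : 0 < Int.gcd t r := Int.gcd_pos_iff.mpr (Or.inr (by omega))
    exact_mod_cast this
  · exact Int.gcd_dvd_right t r

theorem lr_ge_one (r g : Int) (hr : 0 < r) (hg : 1 ≤ g) (hdvd : g ∣ r) :
    1 ≤ PySem.Int.floordiv r g := by
  rw [PySem.Int.floordiv_eq_ediv_of_pos (by omega)]
  rcases hdvd with ⟨c, hc⟩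
  subst hc
  rw [Int.mul_ediv_cancel_left _ (by omega)]
  nlinarith

theorem pyGetD_poly (g l : Int) (hg : 1 ≤ g) (hl : 1 ≤ l) (r : Int) (hlr : l = PySem.Int.floordiv r g) (m : Nat) (hm : m < 5) :
    PySem.List.pyGetD (polyLoopA g l 0 [0,0,0,0,0]) (m:Int) 0 = coeffB r g (m:Int) := by
  rw [PySem.List.pyGetD_natCast, polyLoop_getD g l hg hl m hm, coeffB, hlr]

theorem summandA (r s t : Int) (hr : 0 < r) (hs : 0 < s) (ht : 0 ≤ t) (total : Int) :
    (PySem.List.pyRange 1 4 1).foldl (fun tot j =>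
        tot + PySem.List.pyGetD (polyLoopA (if 0 < t then ((Int.gcd t r : Nat) : Int) else r)
                (PySem.Int.floordiv r (if 0 < t then ((Int.gcd t r : Nat) : Int) else r)) 0 [0,0,0,0,0]) j 0
            * PySem.List.pyGetD (polyLoopA (if 0 < t then ((Int.gcd t s : Nat) : Int) else s)
                (PySem.Int.floordiv s (if 0 < t then ((Int.gcd t s : Nat) : Int) else s)) 0 [0,0,0,0,0]) (4 - j) 0)
      total
    = total + fB r s t := by
  rw [grA_eq t r ht hr, grA_eq t s ht hs]
  obtain ⟨hg1, hd1⟩ := gcd_pos_dvd t r hr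
  obtain ⟨hg2, hd2⟩ := gcd_pos_dvd t s hs
  have hl1 := lr_ge_one r _ hr hg1 hd1
  have hl2 := lr_ge_one s _ hs hg2 hd2
  rw [show PySem.List.pyRange 1 4 1 = [1,2,3] by decide]
  simp only [List.foldl]
  have e1 : (1:Int) = ((1:Nat):Int) := by norm_num
  have e2 : (2:Int) = ((2:Nat):Int) := by norm_num
  have e3 : (3:Int) = ((3:Nat):Int) := by norm_num
  have p1 := pyGetD_poly _ _ hg1 hl1 r rfl 1 (by omega)
  have p2 := pyGetD_poly _ _ hg1 hl1 r rfl 2 (by omega)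
  have p3 := pyGetD_poly _ _ hg1 hl1 r rfl 3 (by omega)
  have q1 := pyGetD_poly _ _ hg2 hl2 s rfl 1 (by omega)
  have q2 := pyGetD_poly _ _ hg2 hl2 s rfl 2 (by omega)
  have q3 := pyGetD_poly _ _ hg2 hl2 s rfl 3 (by omega)
  rw [fB]
  rw [show PySem.List.pyRange 1 4 1 = [1,2,3] by decide]
  simp only [List.map, List.sum_cons, List.sum_nil]
  rw [show (4:Int) - 1 = ((3:Nat):Int) by norm_num, show (4:Int) - 2 = ((2:Nat):Int) by norm_num,
      show (4:Int) - 3 = ((1:Nat):Int) by norm_num]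
  rw [e1, e2, e3] at *
  rw [p1, p2, p3, q1, q2, q3]
  push_cast
  ring

-- regrouping a Burnside-type sum by the gcd with n
theorem sum_gcd_fiber (n : Nat) (hn : 0 < n) (F : Nat → Int) :
    ∑ t ∈ Finset.range n, F (Nat.gcd n t)
      = ∑ d ∈ n.divisors, (Nat.totient (n / d) : Int) * F d := by
  rw [← Finset.sum_fiberwise_of_maps_to (g := fun t => Nat.gcd n t)
      (t := n.divisors) (fun t _ => Nat.mem_divisors.mpr ⟨Nat.gcd_dvd_left n t, by omega⟩)]
  refine Finset.sum_congr rfl (fun d hd => ?_)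
  have hdn : d ∣ n := (Nat.mem_divisors.mp hd).1
  calc ∑ t ∈ Finset.range n with Nat.gcd n t = d, F (Nat.gcd n t)
      = ∑ t ∈ Finset.range n with Nat.gcd n t = d, F d := by
        refine Finset.sum_congr rfl (fun t ht => ?_)
        rw [(Finset.mem_filter.mp ht).2]
    _ = ((Finset.range n).filter (fun t => Nat.gcd n t = d)).card • F d := by
        rw [Finset.sum_const]
    _ = (Nat.totient (n / d) : Int) * F d := by
        rw [← Nat.totient_div_of_dvd hdn, nsmul_eq_mul]

-- sum of an Int-valued list re-expressed over a Finset of Nats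
theorem list_sum_eq_finset_sum (xs : List Int) (F : Finset Nat) (f : Int → Int) (g : Nat → Int)
    (hnd : xs.Nodup) (hmem : ∀ x, x ∈ xs ↔ ∃ k ∈ F, x = (k:Int))
    (hfg : ∀ k ∈ F, f (k:Int) = g k) :
    (xs.map f).sum = ∑ k ∈ F, g k := by
  have hperm : xs.Perm (F.toList.map (Nat.cast : Nat → Int)) := by
    rw [List.perm_ext_iff_of_nodup hnd
      ((Finset.nodup_toList F).map Nat.cast_injective)]
    intro a
    rw [hmem a, List.mem_map]
    constructor
    · rintro ⟨k, hk, rfl⟩; exact ⟨k, Finset.mem_toList.mpr hk, rfl⟩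
    · rintro ⟨k, hk, rfl⟩; exact ⟨k, Finset.mem_toList.mp hk, rfl⟩
  rw [(hperm.map f).sum_eq, List.map_map]
  have : (F.toList.map (f ∘ (Nat.cast : Nat → Int))) = F.toList.map g := by
    refine List.map_congr_left (fun k hk => ?_)
    exact hfg k (Finset.mem_toList.mp hk)
  rw [this]
  rw [← List.sum_toFinset g (Finset.nodup_toList F), Finset.toList_toFinset]

-- phi(m) = m - sum of phi over proper divisors
theorem totient_rec (m : Nat) (hm : 0 < m) :
    (Nat.totient m : Int) = (m:Int) - ∑ k ∈ m.divisors.erase m, (Nat.totient k : Int) := by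
  have h := Nat.sum_totient m
  have hmem : m ∈ m.divisors := Nat.mem_divisors_self m (by omega)
  have h2 : ∑ k ∈ m.divisors.erase m, Nat.totient k + Nat.totient m = m := by
    rw [Finset.sum_erase_add _ _ hmem]; exact h
  have := congrArg (fun x : Nat => (x : Int)) h2
  push_cast at this
  omega

theorem phiLoop (n : Nat) (hn : 0 < n) (full : List Int)
    (hmem : ∀ x, x ∈ full ↔ (0 < x ∧ x ∣ (n:Int)))
    (hsort : full.Pairwise (· < ·)) :
    ∀ (xs P : List Int), full = P ++ xs →
    ∀ (d0 : PySem.Dict Int Int),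
    (∀ e ∈ full, e ∉ xs → d0.getD e 0 = (Nat.totient e.toNat : Int)) →
    ∀ e ∈ full,
      (xs.foldl (fun phi m => phi.insert m
          (m - ((full.filter (fun d => decide (d < m ∧ PySem.Int.mod m d = 0))).map
            (fun d => phi.getD d 0)).sum)) d0).getD e 0
        = (Nat.totient e.toNat : Int) := by
  intro xs
  induction xs with
  | nil =>
    intro P hP d0 hinv e he
    simpa using hinv e he (List.not_mem_nil)
  | cons m xs ih =>
    intro P hP d0 hinv e he
    have hmfull : m ∈ full := by rw [hP]; simp
    obtain ⟨hm0, hmdvd⟩ := (hmem m).mp hmfull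
    set mn := m.toNat with hmn
    have hmcast : m = (mn : Int) := by omega
    have hmndvd : mn ∣ n := by
      rwa [hmcast, Int.natCast_dvd_natCast] at hmdvd
    have hmn0 : 0 < mn := by omega
    -- elements of full below m are not in m :: xs
    have hbelow : ∀ y ∈ full, y < m → y ∉ (m :: xs) := by
      intro y hy hylt hymem
      rw [hP] at hsort
      rcases List.mem_cons.mp hymem with rfl | hyxs
      · omega
      · have h2 := (List.pairwise_append.mp hsort).2.1
        have := (List.pairwise_cons.mp h2).1 y hyxs
        omega
    -- the filtered sum is the sum of totients over proper divisors of mn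
    have hsum : ((full.filter (fun d => decide (d < m ∧ PySem.Int.mod m d = 0))).map
        (fun d => d0.getD d 0)).sum = ∑ k ∈ mn.divisors.erase mn, (Nat.totient k : Int) := by
      apply list_sum_eq_finset_sum
      · exact (List.Pairwise.imp (fun h => ne_of_lt h) hsort).filter _
      · intro x
        rw [List.mem_filter, decide_eq_true_iff, PySem.Int.mod_eq_zero_iff_dvd, hmem]
        constructor
        · rintro ⟨⟨hx0, hxn⟩, hxm, hxdvd⟩
          refine ⟨x.toNat, ?_, by omega⟩
          rw [Finset.mem_erase, Nat.mem_divisors]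
          have : x.toNat ∣ mn := by
            have h' : ((x.toNat : Nat) : Int) ∣ (mn : Int) := by
              rw [Int.toNat_of_nonneg (by omega : (0:Int) ≤ x), ← hmcast]
              exact hxdvd
            exact_mod_cast h'
          exact ⟨by omega, this, by omega⟩
        · rintro ⟨k, hk, rfl⟩
          rw [Finset.mem_erase, Nat.mem_divisors] at hk
          obtain ⟨hkne, hkdvd, -⟩ := hk
          have hk0 : 0 < k := Nat.pos_of_dvd_of_pos hkdvd hmn0
          have hklt : k < mn := by
            have := Nat.le_of_dvd hmn0 hkdvd
            omega
          refine ⟨⟨by exact_mod_cast hk0, ?_⟩, by omega, ?_⟩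
          · rw [Int.natCast_dvd_natCast]
            exact hkdvd.trans hmndvd
          · rw [hmcast, Int.natCast_dvd_natCast]
            exact hkdvd
      · intro k hk
        rw [Finset.mem_erase, Nat.mem_divisors] at hk
        obtain ⟨hkne, hkdvd, -⟩ := hk
        have hk0 : 0 < k := Nat.pos_of_dvd_of_pos hkdvd hmn0
        have hklt : k < mn := by
          have := Nat.le_of_dvd hmn0 hkdvd
          omega
        have hkfull : (k:Int) ∈ full := by
          rw [hmem]
          exact ⟨by exact_mod_cast hk0, by rw [Int.natCast_dvd_natCast]; exact hkdvd.trans hmndvd⟩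
        rw [hinv _ hkfull (hbelow _ hkfull (by omega))]
        simp
    -- the inserted value is totient mn
    have hval : m - ((full.filter (fun d => decide (d < m ∧ PySem.Int.mod m d = 0))).map
        (fun d => d0.getD d 0)).sum = (Nat.totient mn : Int) := by
      rw [hsum, totient_rec mn hmn0, hmcast]
    simp only [List.foldl_cons]
    refine ih (P ++ [m]) (by rw [hP]; simp) _ ?_ e he
    intro e' he' he'xs
    by_cases hcase : e' = m
    · subst hcase
      rw [PySem.Dict.getD_insert_self, hval]
    · rw [PySem.Dict.getD_insert_of_ne _ _ _ hcase]
      exact hinv e' he' (by simp [hcase, he'xs])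

def blockB (L : Int) (i : Int) : List Int :=
  if PySem.Int.mod L i = 0 then
    if i = PySem.Int.floordiv L i then [i] else [i, PySem.Int.floordiv L i]
  else []

def divsB (n : Nat) : List Int :=
  (PySem.List.pyRange 1 ((Nat.sqrt n : Int) + 1) 1).flatMap (blockB (n:Int))

theorem sqrt_pos (n : Nat) (hn : 0 < n) : 0 < Nat.sqrt n := Nat.sqrt_pos.mpr hn

theorem le_div_sqrt (n i : Nat) (hn : 0 < n) (hi : 0 < i) (his : i ≤ Nat.sqrt n) :
    Nat.sqrt n ≤ n / i := by
  have h1 : Nat.sqrt n ≤ n / Nat.sqrt n := by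
    rw [Nat.le_div_iff_mul_le (sqrt_pos n hn)]
    have := Nat.sqrt_le' n
    nlinarith
  exact le_trans h1 (Nat.div_le_div_left his hi)

theorem div_gt_sqrt (n i : Nat) (hn : 0 < n) (hi : 0 < i) (his : i ≤ Nat.sqrt n)
    (hdvd : i ∣ n) (hne : n / i ≠ i) : Nat.sqrt n < n / i := by
  rcases lt_or_eq_of_le (le_div_sqrt n i hn hi his) with h | h
  · exact h
  · exfalso
    apply hne
    have hmul : n / i * i = n := Nat.div_mul_cancel hdvd
    rw [← h] at hmul
    have hs := sqrt_pos n hn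
    have h2 : Nat.sqrt n * Nat.sqrt n ≤ n := by nlinarith [Nat.sqrt_le' n]
    have hi' : i = Nat.sqrt n := by nlinarith
    omega

theorem div_le_sqrt (n k : Nat) (hn : 0 < n) (hk : Nat.sqrt n < k) (hk0 : 0 < k) :
    n / k ≤ Nat.sqrt n := by
  have h1 : n / (Nat.sqrt n + 1) ≤ Nat.sqrt n := by
    have := Nat.lt_succ_sqrt n
    rw [← Nat.lt_succ_iff, Nat.div_lt_iff_lt_mul (by omega)]
    omega
  exact le_trans (Nat.div_le_div_left (by omega) (by omega)) h1

-- members of a block, in usable Nat form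

theorem mem_blockB (n : Nat) (hn : 0 < n) (i x : Int) (hi1 : 1 ≤ i) (hi2 : i ≤ (Nat.sqrt n : Int)) :
    x ∈ blockB (n:Int) i ↔
      (i.toNat ∣ n ∧ (x = i ∨ (x = ((n / i.toNat : Nat) : Int) ∧ n / i.toNat ≠ i.toNat))) := by
  obtain ⟨m, rfl⟩ : ∃ m : Nat, i = (m : Int) := ⟨i.toNat, by omega⟩
  simp only [Int.toNat_natCast]
  have hmod : (PySem.Int.mod (n:Int) (m:Int) = 0) ↔ m ∣ n := by
    rw [PySem.Int.mod_eq_zero_iff_dvd, Int.natCast_dvd_natCast]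
  unfold blockB
  rw [PySem.Int.floordiv_natCast]
  split_ifs with h1 h2
  · simp only [List.mem_singleton]
    constructor
    · rintro rfl
      exact ⟨hmod.mp h1, Or.inl rfl⟩
    · rintro ⟨-, rfl | ⟨rfl, hne⟩⟩
      · rfl
      · exfalso; exact hne (by omega)
  · simp only [List.mem_cons, List.not_mem_nil, or_false]
    constructor
    · rintro (rfl | rfl)
      · exact ⟨hmod.mp h1, Or.inl rfl⟩
      · exact ⟨hmod.mp h1, Or.inr ⟨rfl, by omega⟩⟩
    · rintro ⟨-, rfl | ⟨rfl, -⟩⟩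
      · exact Or.inl rfl
      · exact Or.inr rfl
  · simp only [List.not_mem_nil, false_iff]
    rintro ⟨hd, -⟩
    exact h1 (hmod.mpr hd)

theorem mem_divsB (n : Nat) (hn : 0 < n) (x : Int) :
    x ∈ divsB n ↔ 0 < x ∧ x ∣ (n:Int) := by
  unfold divsB
  rw [List.mem_flatMap]
  constructor
  · rintro ⟨i, hi, hx⟩
    rw [PySem.List.mem_pyRange_one] at hi
    obtain ⟨hi1, hi2⟩ := hi
    rw [mem_blockB n hn i x hi1 (by omega)] at hx
    obtain ⟨hdvd, hx⟩ := hx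
    rcases hx with rfl | ⟨rfl, -⟩
    · refine ⟨by omega, ?_⟩
      have h := Int.natCast_dvd_natCast.mpr hdvd
      rwa [Int.toNat_of_nonneg (by omega)] at h
    · have hpos : 0 < n / i.toNat := Nat.div_pos (Nat.le_of_dvd hn hdvd) (by omega)
      exact ⟨by exact_mod_cast hpos,
        by rw [Int.natCast_dvd_natCast]; exact Nat.div_dvd_of_dvd hdvd⟩
  · rintro ⟨hx, hdvd⟩
    have hk : x = ((x.toNat : Nat) : Int) := by omega
    set k := x.toNat with hkdef
    have hkdvd : k ∣ n := by rwa [hk, Int.natCast_dvd_natCast] at hdvd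
    have hk1 : 1 ≤ k := by omega
    by_cases hcase : k ≤ Nat.sqrt n
    · refine ⟨(k:Int), ?_, ?_⟩
      · rw [PySem.List.mem_pyRange_one]
        refine ⟨by exact_mod_cast hk1, by push_cast; omega⟩
      · rw [mem_blockB n hn _ _ (by exact_mod_cast hk1) (by exact_mod_cast hcase)]
        exact ⟨by simpa using hkdvd, Or.inl (by omega)⟩
    · have h1 : 0 < n / k := Nat.div_pos (Nat.le_of_dvd hn hkdvd) (by omega)
      have h2 : n / k ≤ Nat.sqrt n := div_le_sqrt n k hn (by omega) (by omega)
      refine ⟨((n / k : Nat) : Int), ?_, ?_⟩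
      · rw [PySem.List.mem_pyRange_one]
        refine ⟨by exact_mod_cast h1, by push_cast; omega⟩
      · rw [mem_blockB n hn _ _ (by exact_mod_cast h1) (by exact_mod_cast h2)]
        simp only [Int.toNat_natCast]
        have hdd : n / (n / k) = k := Nat.div_div_self hkdvd (by omega)
        exact ⟨Nat.div_dvd_of_dvd hkdvd, Or.inr ⟨by rw [hdd]; try omega, by rw [hdd]; try omega⟩⟩

theorem nodup_divsB (n : Nat) (hn : 0 < n) : (divsB n).Nodup := by
  unfold divsB
  rw [List.nodup_flatMap]
  constructor
  · intro i hi
    rw [PySem.List.mem_pyRange_one] at hi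
    unfold blockB
    split_ifs with h1 h2
    · exact List.nodup_singleton _
    · simp [List.nodup_cons]
      intro h; exact h2 h
    · exact List.nodup_nil
  · have hpr := PySem.List.pairwise_lt_pyRange_one (a := 1) (b := (Nat.sqrt n : Int) + 1)
    refine List.Pairwise.imp_of_mem ?_ hpr
    intro i j hi hj hij
    rw [PySem.List.mem_pyRange_one] at hi hj
    intro x hxi hxj
    rw [mem_blockB n hn i x hi.1 (by omega)] at hxi
    rw [mem_blockB n hn j x hj.1 (by omega)] at hxj
    obtain ⟨hdi, hxi⟩ := hxi
    obtain ⟨hdj, hxj⟩ := hxj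
    have hsq : 0 < Nat.sqrt n := sqrt_pos n hn
    rcases hxi with rfl | ⟨rfl, hnei⟩ <;> rcases hxj with h | ⟨h, hnej⟩
    · omega
    · -- i = ↑(n / j.toNat), i small but n/j big
      have := div_gt_sqrt n j.toNat hn (by omega) (by omega) hdj (by omega)
      omega
    · have := div_gt_sqrt n i.toNat hn (by omega) (by omega) hdi (by omega)
      omega
    · -- n/i = n/j with i ≠ j
      have h1 : n / (n / i.toNat) = i.toNat := Nat.div_div_self hdi (by omega)
      have h2 : n / (n / j.toNat) = j.toNat := Nat.div_div_self hdj (by omega)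
      have : n / i.toNat = n / j.toNat := by omega
      rw [this] at h1
      omega

-- ===== glue =====

theorem floordiv_zero_left (b : Int) : PySem.Int.floordiv 0 b = 0 := by
  have h := PySem.Int.floordiv_mul_add_mod 0 b
  rcases lt_trichotomy b 0 with hb | rfl | hb
  · have := PySem.Int.mod_neg_bounds (a := 0) hb
    nlinarith [h, this.1, this.2]
  · simp [PySem.Int.floordiv]
  · have h1 := PySem.Int.mod_nonneg (a := 0) hb
    have h2 := PySem.Int.mod_lt (a := 0) hb
    nlinarith

-- gcd of A's L with both factors, exactly
theorem pvL_mul (r s : Int) (hr : r ≠ 0) :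
    PySem.Int.floordiv (r * s) (Int.gcd r s) * (Int.gcd r s : Int) = r * s := by
  have hg : 0 < Int.gcd r s := Int.gcd_pos_iff.mpr (Or.inl hr)
  rw [PySem.Int.floordiv_eq_ediv_of_pos (by exact_mod_cast hg)]
  exact Int.ediv_mul_cancel ((Int.gcd_dvd_left r s).trans (Dvd.intro s rfl))

theorem pvr_dvd_L (r s : Int) (hr : r ≠ 0) (hs : s ≠ 0) :
    r ∣ PySem.Int.floordiv (r * s) (Int.gcd r s)
    ∧ s ∣ PySem.Int.floordiv (r * s) (Int.gcd r s) := by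
  have hg : 0 < Int.gcd r s := Int.gcd_pos_iff.mpr (Or.inl hr)
  set G : Int := (Int.gcd r s : Int) with hG
  have hg' : (0:Int) < G := by rw [hG]; exact_mod_cast hg
  rw [PySem.Int.floordiv_eq_ediv_of_pos hg']
  constructor
  · obtain ⟨c, hc⟩ : G ∣ s := Int.gcd_dvd_right r s
    refine ⟨c, ?_⟩
    rw [show r * s = r * c * G by rw [hc]; ring, Int.mul_ediv_cancel _ (by omega)]
  · obtain ⟨c, hc⟩ : G ∣ r := Int.gcd_dvd_left r s
    refine ⟨c, ?_⟩
    rw [show r * s = s * c * G by rw [hc]; ring, Int.mul_ediv_cancel _ (by omega)]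

theorem fB_gcd (r s : Int) (n t : Nat) (hr : 0 < r) (hs : 0 < s)
    (hRn : r ∣ (n:Int)) (hSn : s ∣ (n:Int)) :
    fB r s (t:Int) = fB r s ((Nat.gcd n t : Nat) : Int) := by
  have h1 : Int.gcd (t:Int) r = Int.gcd ((Nat.gcd n t : Nat) : Int) r := by
    have hR : r = ((r.toNat : Nat) : Int) := by omega
    rw [hR]
    simp only [Int.gcd_natCast_natCast]
    have hRdvd : r.toNat ∣ n := by rwa [hR, Int.natCast_dvd_natCast] at hRn
    rw [Nat.gcd_comm n t, Nat.gcd_assoc, Nat.gcd_eq_right hRdvd]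
  have h2 : Int.gcd (t:Int) s = Int.gcd ((Nat.gcd n t : Nat) : Int) s := by
    have hS : s = ((s.toNat : Nat) : Int) := by omega
    rw [hS]
    simp only [Int.gcd_natCast_natCast]
    have hSdvd : s.toNat ∣ n := by rwa [hS, Int.natCast_dvd_natCast] at hSn
    rw [Nat.gcd_comm n t, Nat.gcd_assoc, Nat.gcd_eq_right hSdvd]
  unfold fB
  rw [h1, h2]

theorem main_equiv : ∀ (r s : Int), Pre_N4_pair r s → N4_pair r s = N4_pair_alt r s := by
  rintro r s ⟨hr0, hs0, hpos⟩
  simp only [N4_pair, N4_pair_alt]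
  set g : Int := (Int.gcd r s : Int) with hgdef
  set L : Int := PySem.Int.floordiv (r * s) g with hLdef
  have hg : (0:Int) < g := by
    rw [hgdef]
    have : 0 < Int.gcd r s := Int.gcd_pos_iff.mpr (Or.inl hr0)
    exact_mod_cast this
  have hLg := pvL_mul r s hr0
  rw [← hgdef, ← hLdef] at hLg
  by_cases hLpos : 0 < L
  case neg =>
    have hL0 : L ≠ 0 := by
      intro h
      rw [h, zero_mul] at hLg
      rcases mul_eq_zero.mp hLg.symm with h' | h'
      · exact hr0 h'
      · exact hs0 h'
    rw [PySem.List.pyRange_one_eq_nil (not_lt.mp hLpos), if_neg hLpos,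
        PySem.List.pyRange_one_eq_nil (le_refl 1)]
    simp [floordiv_zero_left, show PySem.List.sorted ([]:List Int) (fun x => x) false = [] from rfl]
  case pos =>
    set n : Nat := L.toNat with hndef
    have hLn : L = (n : Int) := by omega
    have hn : 0 < n := by omega
    obtain ⟨hrL, hsL⟩ := pvr_dvd_L r s hr0 hs0
    rw [← hgdef, ← hLdef] at hrL hsL
    rw [hLn] at hrL hsL
    have hr : 0 < r := by
      rcases hpos with h | h
      · exact h
      · by_contra hcon
        have hrneg : r < 0 := by omega
        have : L > 0 := hLpos
        nlinarith [hLg]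
    have hs : 0 < s := by
      by_contra hcon
      have hsneg : s < 0 := by omega
      have : L > 0 := hLpos
      nlinarith [hLg]
    rw [hLn]
    have hnpos : (0:Int) < (n:Int) := by exact_mod_cast hn
    -- ===== A side =====
    rw [PySem.List.foldl_congr_mem _ _ (fun total t => total + fB r s t) _ (by
      intro acc t ht
      rw [PySem.List.mem_pyRange_one] at ht
      exact summandA r s t hr hs ht.1 acc)]
    rw [PySem.List.foldl_add, zero_add, PySem.List.pyRange_one, List.map_map]
    have hmapA : ((List.range (((n:Int)) - 0).toNat).map ((fB r s) ∘ fun k : Nat => 0 + (k:Int)))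
        = (List.range n).map (fun k : Nat => fB r s (k:Int)) := by
      simp
    rw [hmapA]
    have hsumA : ((List.range n).map (fun k : Nat => fB r s (k:Int))).sum
        = ∑ d ∈ n.divisors, (Nat.totient (n / d) : Int) * fB r s (d:Int) := by
      rw [← List.sum_toFinset _ (List.nodup_range), List.toFinset_range]
      rw [Finset.sum_congr rfl (fun t _ => by
        rw [fB_gcd r s n t hr hs hrL hsL])]
      exact sum_gcd_fiber n hn (fun d => fB r s (d:Int))
    rw [hsumA]
    -- ===== B side =====
    rw [if_pos hnpos]
    have hdivs : (PySem.List.pyRange 1 ((Nat.sqrt n : Int) + 1) 1).foldl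
        (fun divs i =>
          if PySem.Int.mod (n:Int) i = 0 then
            let divs' := divs ++ [i]
            if i = PySem.Int.floordiv (n:Int) i then divs' else divs' ++ [PySem.Int.floordiv (n:Int) i]
          else divs) [] = divsB n := by
      rw [PySem.List.foldl_congr_mem _ _ (fun divs i => divs ++ blockB (n:Int) i) _ (by
        intro acc i _
        unfold blockB
        dsimp only
        split_ifs <;> simp)]
      rw [PySem.List.foldl_append_eq_flatMap]
      rw [divsB, List.nil_append]
    rw [hdivs]
    set sd := PySem.List.sorted (divsB n) (fun x => x) false with hsddef
    have hsdperm : sd.Perm (divsB n) := PySem.List.sorted_perm _ _ _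
    have hsdnd : sd.Nodup := hsdperm.nodup_iff.mpr (nodup_divsB n hn)
    have hsdmem : ∀ x, x ∈ sd ↔ 0 < x ∧ x ∣ (n:Int) := by
      intro x
      rw [hsdperm.mem_iff, mem_divsB n hn]
    have hsdle : sd.Pairwise (· ≤ ·) := PySem.List.sorted_pairwise _ _
    have hsdlt : sd.Pairwise (· < ·) := by
      have hand := hsdle.and hsdnd
      exact hand.imp (fun h => lt_of_le_of_ne h.1 h.2)
    have hphi := phiLoop n hn sd hsdmem hsdlt sd [] rfl PySem.Dict.empty
      (fun e he hne => absurd he hne)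
    apply congrArg (fun x => PySem.Int.floordiv x ((n:Int)))
    rw [list_sum_eq_finset_sum sd n.divisors _
      (fun k => (Nat.totient (n / k) : Int) * fB r s (k:Int))
      hsdnd (by
        intro x
        rw [hsdmem x]
        constructor
        · rintro ⟨hx, hdvd⟩
          exact ⟨x.toNat, Nat.mem_divisors.mpr
            ⟨by rwa [← Int.natCast_dvd_natCast, Int.toNat_of_nonneg (by omega)], by omega⟩, by omega⟩
        · rintro ⟨k, hk, rfl⟩
          rw [Nat.mem_divisors] at hk
          have : 0 < k := Nat.pos_of_dvd_of_pos hk.1 hn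
          exact ⟨by exact_mod_cast this, by rw [Int.natCast_dvd_natCast]; exact hk.1⟩)
      (by
        intro k hk
        rw [Nat.mem_divisors] at hk
        have hk0 : 0 < k := Nat.pos_of_dvd_of_pos hk.1 hn
        have hfl : PySem.Int.floordiv ((n:Int)) (k:Int) = ((n / k : Nat) : Int) := by
          rw [PySem.Int.floordiv_natCast]
        rw [hfl]
        have hnk : ((n / k : Nat) : Int) ∈ sd := by
          rw [hsdmem]
          have h1 : 0 < n / k := Nat.div_pos (Nat.le_of_dvd hn hk.1) hk0
          exact ⟨by exact_mod_cast h1, by rw [Int.natCast_dvd_natCast]; exact Nat.div_dvd_of_dvd hk.1⟩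
        rw [hphi _ hnk, Int.toNat_natCast])]

-- ===== VERDICT (by name: the statement is the Claim_ definition above) =====
theorem N4_pair_spec : Claim_equal_N4_pair := by
  intro r s _ hpre
  unfold Spec_N4_pair
  exact main_equiv r s hpre
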